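-- pv_equiv track=rewrite | github.com/sagar31594/Foundations-of-Artificial-Intelligence-CSCI-561 | homework3/homework.py | findComplements
-- ===== SOURCE A (Python) =====
-- def findComplements(clause1, clause2):
-- 	keys = []
-- 	pos = []
-- 	for key in clause1:
-- 		if key in clause2:
-- 			for i in range(len(clause1[key])):
-- 				for j in range(len(clause2[key])):
-- 					if (clause1[key][i][0] ==  (not clause2[key][j][0])):
-- 						keys.append(key)
-- 						pos.append([i, j])
-- 	return keys, pos
-- ===== SOURCE B (Python) =====
-- def findComplements(clause1, clause2):
-- 	keys = []
-- 	pos = []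
-- 	for key, lits1 in clause1.items():
-- 		lits2 = clause2.get(key)
-- 		if not lits1 or not lits2:
-- 			continue
-- 		buckets = {True: [], False: []}
-- 		for j, lit in enumerate(lits2):
-- 			buckets[lit[0]].append(j)
-- 		for i, lit in enumerate(lits1):
-- 			for j in buckets[not lit[0]]:
-- 				keys.append(key)
-- 				pos.append([i, j])
-- 	return keys, pos
-- ===== Notes on version B (the rewrite author's own statement) =====
-- stated objective: alternative
-- what changed: Instead of rescanning all of clause2's literals for every clause1 literal, B buckets clause2's literal indices by sign once per shared key and emits the opposite-sign bucket for each clause1 literal (O(n+m+output) per key instead of O(n*m)).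
import Mathlib
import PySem

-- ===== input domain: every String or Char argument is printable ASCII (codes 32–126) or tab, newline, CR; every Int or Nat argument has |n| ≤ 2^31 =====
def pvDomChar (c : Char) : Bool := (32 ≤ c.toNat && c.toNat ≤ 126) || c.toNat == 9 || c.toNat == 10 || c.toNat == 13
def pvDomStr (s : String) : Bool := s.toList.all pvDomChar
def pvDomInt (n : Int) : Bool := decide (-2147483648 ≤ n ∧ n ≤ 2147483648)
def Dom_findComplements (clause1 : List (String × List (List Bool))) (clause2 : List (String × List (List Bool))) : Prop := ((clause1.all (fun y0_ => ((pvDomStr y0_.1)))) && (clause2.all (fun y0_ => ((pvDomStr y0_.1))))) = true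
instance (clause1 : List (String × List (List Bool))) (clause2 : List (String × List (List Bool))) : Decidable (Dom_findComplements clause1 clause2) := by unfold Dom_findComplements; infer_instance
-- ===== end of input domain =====

-- B buckets clause2's literal indices by sign once per shared key, so A's rescans of clause2 for every clause1 literal disappear.

-- ===== PORT A =====
def findComplements (clause1 : List (String × List (List Bool))) (clause2 : List (String × List (List Bool))) : List String × List (List Int) :=
  clause1.foldl (fun acc kv =>
    match clause2.lookup kv.1 with
    | none => acc
    | some v2 =>
      (PySem.List.pyRange 0 (PySem.List.len kv.2) 1).foldl (fun acc i =>
        (PySem.List.pyRange 0 (PySem.List.len v2) 1).foldl (fun acc j =>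
          if PySem.List.pyGetD (PySem.List.pyGetD kv.2 i []) 0 false
               == !(PySem.List.pyGetD (PySem.List.pyGetD v2 j []) 0 false)
          then (acc.1 ++ [kv.1], acc.2 ++ [[i, j]]) else acc) acc) acc) ([], [])

-- ===== PORT B ===== (transliteration of Source B: bucket clause2's indices by sign, emit the opposite-sign bucket per clause1 literal)
def findComplements_alt (clause1 : List (String × List (List Bool))) (clause2 : List (String × List (List Bool))) : List String × List (List Int) :=
  clause1.foldl (fun acc kv =>
    match clause2.lookup kv.1 with
    | none => acc
    | some lits2 =>
      if kv.2.isEmpty || lits2.isEmpty then acc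
      else
        let buckets : List Int × List Int :=
          (PySem.List.enumerate lits2 0).foldl (fun bk p =>
            if PySem.List.pyGetD p.2 0 false then (bk.1 ++ [p.1], bk.2) else (bk.1, bk.2 ++ [p.1])) ([], [])
        (PySem.List.enumerate kv.2 0).foldl (fun acc p =>
          (if PySem.List.pyGetD p.2 0 false then buckets.2 else buckets.1).foldl
            (fun acc j => (acc.1 ++ [kv.1], acc.2 ++ [[p.1, j]])) acc) acc) ([], [])

-- ===== PRECONDITION & SPEC =====
-- Pre_ excludes (a) association lists with duplicate keys, which a Python dict cannot contain (the dict encoding is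
-- ambiguous there), and (b) inputs on which A raises IndexError: a shared key whose two literal lists are both
-- nonempty while one of them contains an empty literal (the [0]-access fails).
def Pre_findComplements (clause1 : List (String × List (List Bool))) (clause2 : List (String × List (List Bool))) : Prop :=
  (clause1.map Prod.fst).Nodup ∧ (clause2.map Prod.fst).Nodup ∧
  ∀ kv ∈ clause1, kv.2 = [] ∨ (clause2.lookup kv.1).getD [] = [] ∨
    ([] ∉ kv.2 ∧ [] ∉ (clause2.lookup kv.1).getD [])
instance (clause1 : List (String × List (List Bool))) (clause2 : List (String × List (List Bool))) : Decidable (Pre_findComplements clause1 clause2) := by unfold Pre_findComplements; infer_instance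

def pvWitness_findComplements : (List (String × List (List Bool))) × (List (String × List (List Bool))) :=
  ([("p", [[true], [false, true]]), ("q", [[false]])], [("p", [[false], [true]])])

def Spec_findComplements (clause1 : List (String × List (List Bool))) (clause2 : List (String × List (List Bool))) (out : List String × List (List Int)) : Prop := out = findComplements_alt clause1 clause2
instance (clause1 : List (String × List (List Bool))) (clause2 : List (String × List (List Bool))) (out : List String × List (List Int)) : Decidable (Spec_findComplements clause1 clause2 out) := by unfold Spec_findComplements; infer_instance

-- ===== CLAIM (what is proved, stated in full; the proofs are below) =====
def Claim_equal_findComplements : Prop := ∀ (clause1 : List (String × List (List Bool))) (clause2 : List (String × List (List Bool))), Dom_findComplements clause1 clause2 → Pre_findComplements clause1 clause2 → Spec_findComplements clause1 clause2 (findComplements clause1 clause2)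

-- ===== LEMMAS AND PROOFS =====

-- A's conditional inner scan over all of clause2's indices is the fold of the filtered index list.
theorem pv_filter_fold (key : String) (g : Int → List Int) (q : Int → Bool) :
    ∀ (js : List Int) (acc : List String × List (List Int)),
      js.foldl (fun acc j => if q j then (acc.1 ++ [key], acc.2 ++ [g j]) else acc) acc
        = (js.filter q).foldl (fun acc j => (acc.1 ++ [key], acc.2 ++ [g j])) acc := by
  intro js
  induction js with
  | nil => intro acc; rfl
  | cons x xs ih =>
    intro acc
    by_cases h : q x <;> simp [List.foldl_cons, h, ih]

-- B's bucket-building loop, characterised: each bucket is the filtered index projection.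
theorem pv_buckets (l : List (Int × List Bool)) :
    ∀ (aT aF : List Int),
      l.foldl (fun bk p =>
          if PySem.List.pyGetD p.2 0 false then (bk.1 ++ [p.1], bk.2) else (bk.1, bk.2 ++ [p.1])) (aT, aF)
        = (aT ++ (l.filter (fun p => PySem.List.pyGetD p.2 0 false)).map (·.1),
           aF ++ (l.filter (fun p => !PySem.List.pyGetD p.2 0 false)).map (·.1)) := by
  induction l with
  | nil => intro aT aF; simp
  | cons x xs ih =>
    intro aT aF
    by_cases h : PySem.List.pyGetD x.2 0 false <;>
      simp [List.foldl_cons, h, ih]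

-- per shared key: A's nested index loops equal B's bucketed emission.
theorem pv_per_key (key : String) (v1 v2 : List (List Bool)) (acc : List String × List (List Int)) :
    (PySem.List.pyRange 0 (PySem.List.len v1) 1).foldl (fun acc i =>
        (PySem.List.pyRange 0 (PySem.List.len v2) 1).foldl (fun acc j =>
          if PySem.List.pyGetD (PySem.List.pyGetD v1 i []) 0 false
               == !(PySem.List.pyGetD (PySem.List.pyGetD v2 j []) 0 false)
          then (acc.1 ++ [key], acc.2 ++ [[i, j]]) else acc) acc) acc
    = (let buckets : List Int × List Int :=
         (PySem.List.enumerate v2 0).foldl (fun bk p =>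
           if PySem.List.pyGetD p.2 0 false then (bk.1 ++ [p.1], bk.2) else (bk.1, bk.2 ++ [p.1])) ([], []);
       (PySem.List.enumerate v1 0).foldl (fun acc p =>
         (if PySem.List.pyGetD p.2 0 false then buckets.2 else buckets.1).foldl
           (fun acc j => (acc.1 ++ [key], acc.2 ++ [[p.1, j]])) acc) acc) := by
  rw [pv_buckets]
  simp only [List.nil_append]
  rw [PySem.List.enumerate_eq_map_pyRange (xs := v2) (d := ([] : List Bool)),
      List.filter_map, List.filter_map, List.map_map, List.map_map]
  have hid : ((fun p : Int × List Bool => p.1) ∘ fun j : Int => (j, PySem.List.pyGetD v2 j ([] : List Bool)))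
      = id := rfl
  rw [hid, List.map_id, List.map_id]
  rw [PySem.List.enumerate_eq_map_pyRange (xs := v1) (d := ([] : List Bool)), List.foldl_map]
  congr 1
  funext acc i
  rw [pv_filter_fold key (fun j => [i, j])
        (fun j => PySem.List.pyGetD (PySem.List.pyGetD v1 i []) 0 false
           == !(PySem.List.pyGetD (PySem.List.pyGetD v2 j []) 0 false))]
  simp only []
  congr 1
  by_cases h1 : PySem.List.pyGetD (PySem.List.pyGetD v1 i []) 0 false <;>
    simp only [h1, if_true, if_false, Bool.false_eq_true] <;>
    (apply List.filter_congr; intro j _;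
     by_cases h2 : PySem.List.pyGetD (PySem.List.pyGetD v2 j []) 0 false <;>
       simp [Function.comp, h2])

-- ===== VERDICT (by name: the statement is the Claim_ definition above) =====
theorem findComplements_spec : Claim_equal_findComplements := by
  intro c1 c2 _ _
  unfold Spec_findComplements findComplements findComplements_alt
  congr 1
  funext acc kv
  cases hl : c2.lookup kv.1 with
  | none => rfl
  | some v2 =>
    simp only []
    by_cases h1 : kv.2.isEmpty
    · have hnil : kv.2 = [] := List.isEmpty_iff.mp h1
      simp [hnil, PySem.List.len, PySem.List.pyRange_one_eq_nil]
    · by_cases h2 : v2.isEmpty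
      · have hnil : v2 = [] := List.isEmpty_iff.mp h2
        subst hnil
        rw [pv_per_key]
        simp [h1, PySem.List.enumerate, List.foldl_fixed]
      · rw [pv_per_key]
        simp [h1, h2]
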